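-- pv_equiv track=rewrite | github.com/byeongkukoh/KBO | apps/api/app/services/season_center_query_service.py | _format_streak
-- ===== SOURCE A (Python) =====
-- def _format_streak(results: list[str]) -> str:
--     if not results:
--         return "-"
--
--     last = results[-1]
--     if last == "D":
--         return "D1"
--
--     count = 0
--     for result in reversed(results):
--         if result != last:
--             break
--         count += 1
--     return f"{last}{count}"
-- ===== SOURCE B (Python) =====
-- def _format_streak(results: list[str]) -> str:
--     if not results:
--         return "-"
--
--     last = results[-1]
--     if last == "D":
--         return "D1"
--
--     count = 0
--     for result in results:
--         count = count + 1 if result == last else 0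
--     return f"{last}{count}"
-- ===== Notes on version B (the rewrite author's own statement) =====
-- stated objective: alternative
-- what changed: Replaces the backward scan with an early break by a single forward pass maintaining a reset-on-mismatch counter; after the pass the counter holds the trailing-run length.
import Mathlib
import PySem

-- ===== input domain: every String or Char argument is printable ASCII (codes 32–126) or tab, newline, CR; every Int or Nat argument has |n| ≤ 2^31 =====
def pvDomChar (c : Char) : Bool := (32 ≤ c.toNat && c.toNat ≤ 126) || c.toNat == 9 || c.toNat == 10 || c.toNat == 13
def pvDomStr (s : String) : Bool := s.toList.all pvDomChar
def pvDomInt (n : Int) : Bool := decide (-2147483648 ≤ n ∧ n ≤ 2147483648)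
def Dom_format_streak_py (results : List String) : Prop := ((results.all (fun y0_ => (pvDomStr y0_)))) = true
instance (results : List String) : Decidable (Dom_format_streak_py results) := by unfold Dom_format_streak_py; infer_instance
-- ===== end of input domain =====

-- B changes the decomposition only: a forward pass with a reset-on-mismatch counter instead of A's backward scan with an early break; same cost.

-- ===== PORT A =====
-- the `for result in reversed(results): if result != last: break; count += 1` loop:
-- recursion over the reversed list, stopping (returning the count so far) at the first mismatch
def pvCountBack (last : String) : List String → Int
  | [] => 0
  | r :: rest => if r ≠ last then 0 else pvCountBack last rest + 1

def format_streak_py (results : List String) : String :=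
  match PySem.List.pyGet? results (-1) with
  | none => "-"            -- `if not results: return "-"`
  | some last =>
    if last == "D" then "D1"
    else last ++ PySem.Int.toStr (pvCountBack last results.reverse)

-- ===== PORT B =====
def format_streak_py_alt (results : List String) : String :=
  match PySem.List.pyGet? results (-1) with
  | none => "-"
  | some last =>
    if last == "D" then "D1"
    else last ++ PySem.Int.toStr
      (results.foldl (fun count result => if result == last then count + 1 else 0) 0)

-- ===== PRECONDITION & SPEC =====
def Spec_format_streak_py (results : List String) (out : String) : Prop := out = format_streak_py_alt results
instance (results : List String) (out : String) : Decidable (Spec_format_streak_py results out) := by unfold Spec_format_streak_py; infer_instance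

-- ===== CLAIM (what is proved, stated in full; the proofs are below) =====
def Claim_equal_format_streak_py : Prop := ∀ (results : List String), Dom_format_streak_py results → Spec_format_streak_py results (format_streak_py results)

-- ===== LEMMAS AND PROOFS =====

-- the forward reset-counter fold computes the length of the trailing run, i.e. pvCountBack on the reverse
theorem pv_fold_eq_countBack (last : String) (xs : List String) :
    xs.foldl (fun count result => if result == last then count + 1 else 0) 0
      = pvCountBack last xs.reverse := by
  induction xs using List.reverseRecOn with
  | nil => simp [pvCountBack]
  | append_singleton ys a ih =>
    rw [List.foldl_append, List.reverse_append]
    simp only [List.foldl, List.reverse_singleton, List.singleton_append, pvCountBack]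
    by_cases h : a = last
    · simp only [h, beq_self_eq_true, if_true]
      simpa using ih
    · simp [h]

-- ===== VERDICT (by name: the statement is the Claim_ definition above) =====
theorem format_streak_py_spec : Claim_equal_format_streak_py := by
  intro results _
  unfold Spec_format_streak_py format_streak_py format_streak_py_alt
  cases h : PySem.List.pyGet? results (-1) with
  | none => rfl
  | some last =>
    dsimp only
    by_cases hd : (last == "D") = true
    · rw [if_pos hd, if_pos hd]
    · rw [if_neg hd, if_neg hd, ← pv_fold_eq_countBack]
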